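-- pv_equiv track=rewrite | github.com/julianactrl/Python_course | Clase04/propagarInvertir.py | propagar
-- ===== SOURCE A (Python) =====
-- def propagar(vector):
--     n=len(vector)-1 #largo de la lista -1
--      #recorro de izquierda a derecha
--     for i in range(n): #cuanto debo de repetirse el proceso(iterar)
--         if (vector[i]==1) and (vector[i+1]==0): # la posición [i] en vector debe ser igual a 1 y la posición siguiente [i+1] en vector debe ser igual 0
--             vector[i+1]=1 #cambia el valor de la posición i+1 a 1
--      #recorro de derecha a izquierda
--     for i in range(n): #cuanto debo de repetirse el proceso(iterar)
--         if (vector[n-i]==1) and (vector[n-1-i]==0):# la posición [n-i] en vector debe ser igual a 1 y la posición anteior [n-1-i] en vector debe ser igual 0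
--             vector[n-1-i]=1 #cambia el valor de la posicion [n-1-i] a 1
--     return vector
--
-- # def propagar(vector):
-- #     señal1=0
-- #     for i,e in enumerate(vector):
-- #         if vector[i] == 1:
-- #             señal1 = 1
-- #         if señal1 == 1:
-- #             if vector[i] == 0:
-- #                 vector[i] = 1
-- #             elif vector[i] == -1:
-- #                 señal1 = 0
-- #     return vector
--
-- # def invertir_lista(lista):
-- #     invertida = []
-- #     for i, e in enumerate(lista, start=1):
-- #         invertida.append(lista[-i])
-- #     return invertida
--
-- # def propagar_invertir(vector):
--     vec=propagar(vector)
--     vec1=invertir_lista(vec)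
--     vec2=propagar(vec1)
--     vec3=invertir_lista(vec2)
--     return vec3
-- ===== SOURCE B (Python) =====
-- def propagar(vector):
--     # One left-to-right pass: buffer each maximal run of 0/1 values; when a
--     # barrier (anything else) or the end is reached, flush the run as all-ones
--     # if it contained a 1, else unchanged.  Mutates vector in place like A.
--     out = []
--     seg = []
--     for x in vector:
--         if x == 0 or x == 1:
--             seg.append(x)
--         else:
--             if 1 in seg:
--                 out.extend([1] * len(seg))
--             else:
--                 out.extend(seg)
--             out.append(x)
--             seg = []
--     if 1 in seg:
--         out.extend([1] * len(seg))
--     else: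
--         out.extend(seg)
--     vector[:] = out
--     return vector
-- ===== Notes on version B (the rewrite author's own statement) =====
-- stated objective: alternative
-- what changed: Replaces A's two in-place index sweeps over the list (left-to-right then right-to-left propagation of 1 into adjacent 0s) by a single left-to-right pass that buffers each maximal run of 0/1 values and flushes it as all-ones when it contains a 1, barriers unchanged.
import Mathlib
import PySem

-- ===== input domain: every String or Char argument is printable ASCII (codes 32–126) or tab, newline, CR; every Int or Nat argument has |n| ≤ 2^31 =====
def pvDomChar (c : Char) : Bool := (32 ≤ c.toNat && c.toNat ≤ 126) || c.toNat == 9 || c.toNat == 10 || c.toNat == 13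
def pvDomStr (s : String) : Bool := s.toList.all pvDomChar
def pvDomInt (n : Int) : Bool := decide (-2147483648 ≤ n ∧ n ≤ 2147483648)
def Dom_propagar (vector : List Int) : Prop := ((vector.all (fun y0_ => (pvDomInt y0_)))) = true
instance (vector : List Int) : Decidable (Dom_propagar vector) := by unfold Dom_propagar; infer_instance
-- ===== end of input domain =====

-- B replaces A's two in-place index sweeps (left-to-right then right-to-left) by a single
-- segmenting pass that flushes each maximal 0/1 run as all-ones when it contains a 1
-- (objective: alternative).  Both A and B mutate the argument list in place to the same
-- final contents and return it; the theorems below are about the returned value.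

-- ===== PORT A =====
-- Python's `for i in range(n)` loops mutating `vector` become fuel recursions over the
-- same state (the list, the loop index).  Every index access of A is in range on every
-- input (0 ≤ i < n = len-1, 1 ≤ n-i ≤ n, 0 ≤ n-1-i < n), so List.getD/List.set are
-- exact here (Python raises only on out-of-range, which never happens).
def pvALeft (v : List Int) (n i : Nat) : List Int :=
  if _h : i < n then
    pvALeft (if v.getD i 0 = 1 ∧ v.getD (i+1) 0 = 0 then v.set (i+1) 1 else v) n (i+1)
  else v
termination_by n - i

def pvARight (v : List Int) (n i : Nat) : List Int :=
  if _h : i < n then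
    pvARight (if v.getD (n-i) 0 = 1 ∧ v.getD (n-1-i) 0 = 0 then v.set (n-1-i) 1 else v) n (i+1)
  else v
termination_by n - i

def propagar (vector : List Int) : List Int :=
  -- Python's n = len(vector)-1 is -1 on []; both loops are then empty, exactly as with Nat 0.
  let n := vector.length - 1
  pvARight (pvALeft vector n 0) n 0

-- ===== PORT B =====
def pvFill (seg : List Int) : List Int :=
  if 1 ∈ seg then List.replicate seg.length 1 else seg

def pvBStep (s : List Int × List Int) (x : Int) : List Int × List Int :=
  if x = 0 ∨ x = 1 then (s.1, s.2 ++ [x])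
  else (s.1 ++ pvFill s.2 ++ [x], [])

def propagar_alt (vector : List Int) : List Int :=
  let s := vector.foldl pvBStep ([], [])
  s.1 ++ pvFill s.2

-- ===== PRECONDITION & SPEC =====
def Spec_propagar (vector : List Int) (out : List Int) : Prop := out = propagar_alt vector
instance (vector : List Int) (out : List Int) : Decidable (Spec_propagar vector out) := by unfold Spec_propagar; infer_instance

-- ===== CLAIM (what is proved, stated in full; the proofs are below) =====
def Claim_equal_propagar : Prop := ∀ (vector : List Int), Dom_propagar vector → Spec_propagar vector (propagar vector)

-- ===== LEMMAS AND PROOFS =====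

/-- One pass of A as a carry machine: the value written at a cell depends on the
(already updated) previous cell only. -/
def pvCarry (c : Int) : List Int → List Int
  | [] => []
  | x :: xs => (if c = 1 ∧ x = 0 then 1 else x) :: pvCarry (if c = 1 ∧ x = 0 then 1 else x) xs

theorem pvCarry_length (c : Int) (xs : List Int) : (pvCarry c xs).length = xs.length := by
  induction xs generalizing c with
  | nil => rfl
  | cons x xs ih => simp [pvCarry, ih]

theorem pvGetD_append (p zs : List Int) (x : Int) : (p ++ x :: zs).getD p.length 0 = x := by
  simp

theorem pvSet_append (p zs : List Int) (a : Int) : (p ++ zs).set p.length a = p ++ zs.set 0 a := by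
  induction p with
  | nil => simp
  | cons h t ih => simp [ih]

/-- The left sweep of A, started at index `p.length`, is the carry machine on the tail. -/
theorem pvALeft_eq (rest : List Int) : ∀ (p : List Int) (x : Int),
    pvALeft (p ++ x :: rest) (p.length + rest.length) p.length = p ++ x :: pvCarry x rest := by
  induction rest with
  | nil => intro p x; rw [pvALeft]; simp [pvCarry]
  | cons y r ih =>
    intro p x
    rw [pvALeft]
    have hlt : p.length < p.length + (y :: r).length := by simp
    rw [dif_pos hlt]
    have hx : (p ++ x :: y :: r).getD p.length 0 = x := pvGetD_append _ _ _
    have hy : (p ++ x :: y :: r).getD (p.length + 1) 0 = y := by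
      have := pvGetD_append (p ++ [x]) r y
      simpa using this
    rw [hx, hy]
    by_cases hc : x = 1 ∧ y = 0
    · rw [if_pos hc]
      have hset : (p ++ x :: y :: r).set (p.length + 1) 1 = (p ++ [x]) ++ 1 :: r := by
        have := pvSet_append (p ++ [x]) (y :: r) 1
        simpa using this
      rw [hset]
      have := ih (p ++ [x]) 1
      simp only [List.length_append, List.length_cons, List.length_nil] at this ⊢
      have harr : p.length + 1 + r.length = p.length + (r.length + 1) := by omega
      rw [harr] at this
      rw [this]
      simp [pvCarry, hc]
    · rw [if_neg hc]
      have := ih (p ++ [x]) y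
      simp only [List.length_append, List.length_cons, List.length_nil] at this ⊢
      have harr : p.length + 1 + r.length = p.length + (r.length + 1) := by omega
      rw [harr] at this
      rw [show p ++ x :: y :: r = (p ++ [x]) ++ y :: r by simp] at *
      rw [this]
      simp [pvCarry, hc]

theorem pvGetD_reverse (l : List Int) (i : Nat) (h : i < l.length) (d : Int) :
    l.reverse.getD i d = l.getD (l.length - 1 - i) d := by
  simp [List.getD_eq_getElem?_getD, List.getElem?_reverse h]

theorem pvSet_reverse (l : List Int) (k : Nat) (a : Int) (h : k < l.length) :
    (l.set k a).reverse = l.reverse.set (l.length - 1 - k) a := by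
  apply List.ext_getElem
  · simp
  · intro i h1 h2
    simp only [List.length_reverse, List.length_set] at h1 h2
    simp only [List.getElem_reverse, List.length_set, List.getElem_set]
    by_cases hk : k = l.length - 1 - i
    · rw [if_pos hk, if_pos (show l.length - 1 - k = i by omega)]
    · rw [if_neg hk, if_neg (show ¬(l.length - 1 - k = i) by omega)]

/-- The right sweep of A is the left sweep of the reversed list, reversed. -/
theorem pvARight_eq_rev (k : Nat) : ∀ (n i : Nat) (v : List Int), i + k = n → v.length = n + 1 →
    pvARight v n i = (pvALeft v.reverse n i).reverse := by
  induction k with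
  | zero =>
    intro n i v hk hl
    rw [pvARight, pvALeft, dif_neg (by omega), dif_neg (by omega)]
    simp
  | succ k ih =>
    intro n i v hk hl
    have hi : i < n := by omega
    rw [pvARight, pvALeft, dif_pos hi, dif_pos hi]
    have h1 : v.reverse.getD i 0 = v.getD (n - i) 0 := by
      rw [pvGetD_reverse v i (by omega)]; congr 1; omega
    have h2 : v.reverse.getD (i + 1) 0 = v.getD (n - 1 - i) 0 := by
      rw [pvGetD_reverse v (i + 1) (by omega)]; congr 1; omega
    rw [h1, h2]
    by_cases hc : v.getD (n - i) 0 = 1 ∧ v.getD (n - 1 - i) 0 = 0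
    · rw [if_pos hc, if_pos hc]
      have hset : v.reverse.set (i + 1) 1 = (v.set (n - 1 - i) 1).reverse := by
        rw [pvSet_reverse v (n - 1 - i) 1 (by omega)]; congr 1; omega
      rw [hset]
      exact ih n (i + 1) _ (by omega) (by simp [hl])
    · rw [if_neg hc, if_neg hc]
      exact ih n (i + 1) v (by omega) hl

/-- A's result in closed form: carry pass, reverse, carry pass, reverse. -/
def pvDouble (v : List Int) : List Int :=
  (pvCarry 0 ((pvCarry 0 v).reverse)).reverse

theorem pvCarry_zero_cons (h : Int) (t : List Int) : pvCarry 0 (h :: t) = h :: pvCarry h t := by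
  simp [pvCarry]

theorem propagar_eq_double (v : List Int) : propagar v = pvDouble v := by
  cases v with
  | nil =>
    show pvARight (pvALeft [] 0 0) 0 0 = _
    rw [pvALeft, dif_neg (by omega), pvARight, dif_neg (by omega)]
    rfl
  | cons h t =>
    show pvARight (pvALeft (h :: t) ((h :: t).length - 1) 0) ((h :: t).length - 1) 0 = _
    have hn : (h :: t).length - 1 = t.length := by simp
    rw [hn]
    have hL : pvALeft (h :: t) t.length 0 = h :: pvCarry h t := by
      have := pvALeft_eq t [] h
      simpa using this
    rw [hL, ← pvCarry_zero_cons]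
    set L := pvCarry 0 (h :: t) with hLdef
    have hlen : L.length = t.length + 1 := by
      rw [hLdef, pvCarry_length]; simp
    rw [pvARight_eq_rev t.length t.length 0 L (by omega) hlen]
    have hrevlen : L.reverse.length = t.length + 1 := by simp [hlen]
    cases hrv : L.reverse with
    | nil => simp [hrv] at hrevlen
    | cons h2 t2 =>
      have ht2 : t2.length = t.length := by
        have := hrevlen; rw [hrv] at this; simpa using this
      have := pvALeft_eq t2 [] h2
      simp only [List.nil_append, List.length_nil, Nat.zero_add] at this
      rw [← ht2, this, ← pvCarry_zero_cons, pvDouble, ← hrv]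

-- characterisations of pvCarry on segments
theorem pvCarry_irrel (xs : List Int) : ∀ (c d : Int), c ≠ 1 → d ≠ 1 → pvCarry c xs = pvCarry d xs := by
  induction xs with
  | nil => intro c d _ _; rfl
  | cons x t ih =>
    intro c d hc hd
    simp only [pvCarry]
    rw [if_neg (show ¬(c = 1 ∧ x = 0) by rintro ⟨h, _⟩; exact hc h),
      if_neg (show ¬(d = 1 ∧ x = 0) by rintro ⟨h, _⟩; exact hd h)]

theorem pvCarry_barrier (b : Int) (hb : b ≠ 0) (xs : List Int) : ∀ (c : Int) (ys : List Int),
    pvCarry c (xs ++ b :: ys) = pvCarry c xs ++ b :: pvCarry b ys := by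
  induction xs with
  | nil =>
    intro c ys
    simp only [List.nil_append, pvCarry]
    rw [if_neg (show ¬(c = 1 ∧ b = 0) by rintro ⟨_, h⟩; exact hb h)]
  | cons x t ih =>
    intro c ys
    simp only [List.cons_append, pvCarry, ih]

theorem pvCarry_one (s : List Int) (hs : ∀ x ∈ s, x = 0 ∨ x = 1) :
    pvCarry 1 s = List.replicate s.length 1 := by
  induction s with
  | nil => rfl
  | cons x t ih =>
    have hx : x = 0 ∨ x = 1 := hs x (by simp)
    have ht := ih (fun y hy => hs y (by simp [hy]))
    rcases hx with h | h <;> simp [pvCarry, h, ht, List.replicate_succ]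

theorem pvCarry_zeros (s : List Int) (hs : ∀ x ∈ s, x = 0) : ∀ (c : Int), c ≠ 1 → pvCarry c s = s := by
  induction s with
  | nil => intro c _; rfl
  | cons x t ih =>
    intro c hc
    have hx : x = 0 := hs x (by simp)
    have hif : (if c = 1 ∧ x = 0 then (1 : Int) else x) = x := by
      rw [if_neg]; rintro ⟨h, _⟩; exact hc h
    simp only [pvCarry, hif]
    rw [ih (fun y hy => hs y (by simp [hy])) x (by rw [hx]; decide)]

theorem pvFirstOne (s : List Int) (hs : ∀ x ∈ s, x = 0 ∨ x = 1) (h1 : 1 ∈ s) :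
    ∃ k r, s = List.replicate k 0 ++ 1 :: r ∧ (∀ x ∈ r, x = 0 ∨ x = 1) := by
  induction s with
  | nil => simp at h1
  | cons x t ih =>
    by_cases hx : x = 1
    · exact ⟨0, t, by simp [hx], fun y hy => hs y (by simp [hy])⟩
    · have hx0 : x = 0 := by rcases hs x (by simp) with h | h; exact h; exact absurd h hx
      have h1t : 1 ∈ t := by rcases List.mem_cons.mp h1 with h | h; exact absurd h.symm hx; exact h
      obtain ⟨k, r, hsplit, hr⟩ := ih (fun y hy => hs y (by simp [hy])) h1t
      exact ⟨k + 1, r, by simp [List.replicate_succ, hx0, hsplit], hr⟩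

theorem pvRepl_shift (m : Nat) (w : List Int) :
    List.replicate m (1 : Int) ++ 1 :: w = 1 :: (List.replicate m 1 ++ w) := by
  induction m with
  | zero => rfl
  | succ m ih => simp [List.replicate_succ, ih]

/-- The two carry passes on a pure 0/1 segment give exactly B's flush. -/
theorem pvDouble_seg (s : List Int) (hs : ∀ x ∈ s, x = 0 ∨ x = 1) :
    (pvCarry 0 ((pvCarry 0 s).reverse)).reverse = pvFill s := by
  by_cases h1 : 1 ∈ s
  · obtain ⟨k, r, hsplit, hr⟩ := pvFirstOne s hs h1
    have hz : ∀ x ∈ List.replicate k (0 : Int), x = 0 := by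
      intro x hx; exact List.eq_of_mem_replicate hx
    have hL : pvCarry 0 s = List.replicate k 0 ++ 1 :: List.replicate r.length 1 := by
      rw [hsplit, pvCarry_barrier 1 (by decide), pvCarry_zeros _ hz 0 (by decide), pvCarry_one r hr]
    have hLrev : (pvCarry 0 s).reverse = 1 :: (List.replicate r.length 1 ++ List.replicate k 0) := by
      rw [hL]
      simp only [List.reverse_append, List.reverse_cons, List.reverse_replicate,
        List.append_assoc, List.singleton_append]
      exact pvRepl_shift r.length (List.replicate k 0)
    have hbits : ∀ x ∈ List.replicate r.length (1 : Int) ++ List.replicate k (0 : Int), x = 0 ∨ x = 1 := by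
      intro x hx
      rcases List.mem_append.mp hx with h | h
      · right; exact List.eq_of_mem_replicate h
      · left; exact List.eq_of_mem_replicate h
    have hC2 : pvCarry 0 ((pvCarry 0 s).reverse)
        = List.replicate (r.length + k + 1) 1 := by
      rw [hLrev]
      show pvCarry 0 (1 :: _) = _
      rw [pvCarry_zero_cons, pvCarry_one _ hbits]
      simp only [List.length_append, List.length_replicate]
      rw [show r.length + k + 1 = (r.length + k) + 1 from rfl, List.replicate_succ]
    rw [hC2, pvFill, if_pos h1, List.reverse_replicate, hsplit]
    congr 1
    simp only [List.length_append, List.length_replicate, List.length_cons]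
    omega
  · have hz : ∀ x ∈ s, x = 0 := by
      intro x hx
      rcases hs x hx with h | h
      · exact h
      · exact absurd (h ▸ hx) h1
    have hzr : ∀ x ∈ s.reverse, x = 0 := by intro x hx; exact hz x (List.mem_reverse.mp hx)
    rw [pvCarry_zeros s hz 0 (by decide), pvCarry_zeros s.reverse hzr 0 (by decide),
      List.reverse_reverse, pvFill, if_neg h1]

-- characterisations of B's fold
theorem pvBFold_bits (s : List Int) (hs : ∀ x ∈ s, x = 0 ∨ x = 1) :
    ∀ (o seg : List Int), List.foldl pvBStep (o, seg) s = (o, seg ++ s) := by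
  induction s with
  | nil => intro o seg; simp
  | cons x t ih =>
    intro o seg
    have hx : x = 0 ∨ x = 1 := hs x (by simp)
    simp only [List.foldl_cons, pvBStep, if_pos hx]
    rw [ih (fun y hy => hs y (by simp [hy]))]
    simp

theorem pvBFold_prefix (xs : List Int) : ∀ (o seg : List Int),
    List.foldl pvBStep (o, seg) xs
      = (o ++ (List.foldl pvBStep ([], seg) xs).1, (List.foldl pvBStep ([], seg) xs).2) := by
  induction xs with
  | nil => intro o seg; simp
  | cons x t ih =>
    intro o seg
    simp only [List.foldl_cons, pvBStep]
    by_cases hx : x = 0 ∨ x = 1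
    · rw [if_pos hx, if_pos hx, ih o, ih []]
    · rw [if_neg hx, if_neg hx, ih (o ++ pvFill seg ++ [x]), ih ([] ++ pvFill seg ++ [x])]
      simp

theorem pvBalt_base (s : List Int) (hs : ∀ x ∈ s, x = 0 ∨ x = 1) :
    propagar_alt s = pvFill s := by
  show (List.foldl pvBStep ([], []) s).1 ++ pvFill (List.foldl pvBStep ([], []) s).2 = _
  rw [pvBFold_bits s hs]
  simp

theorem pvBalt_split (s : List Int) (b : Int) (t : List Int)
    (hs : ∀ x ∈ s, x = 0 ∨ x = 1) (hb : ¬(b = 0 ∨ b = 1)) :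
    propagar_alt (s ++ b :: t) = pvFill s ++ b :: propagar_alt t := by
  show (List.foldl pvBStep ([], []) (s ++ b :: t)).1 ++ pvFill (List.foldl pvBStep ([], []) (s ++ b :: t)).2 = _
  rw [List.foldl_append, pvBFold_bits s hs, List.foldl_cons]
  show (List.foldl pvBStep (pvBStep ([], [] ++ s) b) t).1 ++ _ = _
  simp only [pvBStep, if_neg hb, List.nil_append]
  rw [pvBFold_prefix t]
  show ([] ++ pvFill s ++ [b]) ++ _ ++ pvFill _ = _
  simp [propagar_alt]

theorem pvDecomp (v : List Int) :
    (∀ x ∈ v, x = 0 ∨ x = 1) ∨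
    ∃ s b t, v = s ++ b :: t ∧ (∀ x ∈ s, x = 0 ∨ x = 1) ∧ ¬(b = 0 ∨ b = 1) := by
  induction v with
  | nil => left; simp
  | cons x t ih =>
    by_cases hx : x = 0 ∨ x = 1
    · rcases ih with h | ⟨s, b, t', hsplit, hs, hb⟩
      · left; intro y hy; rcases List.mem_cons.mp hy with h' | h'
        · rw [h']; exact hx
        · exact h y h'
      · right
        refine ⟨x :: s, b, t', by simp [hsplit], ?_, hb⟩
        intro y hy
        rcases List.mem_cons.mp hy with h' | h'
        · rw [h']; exact hx
        · exact hs y h'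
    · exact Or.inr ⟨[], x, t, by simp, by simp, hx⟩

theorem pvMain_aux (n : Nat) : ∀ (v : List Int), v.length ≤ n → pvDouble v = propagar_alt v := by
  induction n with
  | zero =>
    intro v hv
    have : v = [] := List.eq_nil_of_length_eq_zero (by omega)
    subst this; rfl
  | succ n ih =>
    intro v hv
    rcases pvDecomp v with hbits | ⟨s, b, t, hsplit, hs, hb⟩
    · rw [pvBalt_base v hbits, pvDouble, pvDouble_seg v hbits]
    · subst hsplit
      have hb0 : b ≠ 0 := fun h => hb (Or.inl h)
      have hb1 : b ≠ 1 := fun h => hb (Or.inr h)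
      have hL : pvCarry 0 (s ++ b :: t) = pvCarry 0 s ++ b :: pvCarry 0 t := by
        rw [pvCarry_barrier b hb0, pvCarry_irrel t b 0 hb1 (by decide)]
      have hC2 : pvCarry 0 ((pvCarry 0 (s ++ b :: t)).reverse)
          = pvCarry 0 ((pvCarry 0 t).reverse) ++ b :: pvCarry 0 ((pvCarry 0 s).reverse) := by
        rw [hL, List.reverse_append, List.reverse_cons]
        rw [show (pvCarry 0 t).reverse ++ [b] ++ (pvCarry 0 s).reverse
              = (pvCarry 0 t).reverse ++ b :: (pvCarry 0 s).reverse by simp]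
        rw [pvCarry_barrier b hb0, pvCarry_irrel ((pvCarry 0 s).reverse) b 0 hb1 (by decide)]
      have ht : t.length ≤ n := by
        have := hv; simp only [List.length_append, List.length_cons] at this; omega
      rw [pvDouble, hC2, List.reverse_append, List.reverse_cons]
      rw [pvBalt_split s b t hs hb, ← pvDouble_seg s hs, ← ih t ht, pvDouble]
      simp

-- ===== VERDICT (by name: the statement is the Claim_ definition above) =====
theorem propagar_spec : Claim_equal_propagar := by
  intro vector _
  show propagar vector = propagar_alt vector
  rw [propagar_eq_double, pvMain_aux vector.length vector le_rfl]
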